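-- pv_equiv track=rewrite | github.com/NanayaHaruki/leetcode | 序号/2972. 统计移除递增子数组的数目 II.py | incremovableSubarrayCount
-- ===== SOURCE A (Python) =====
-- from typing import List
--
-- def incremovableSubarrayCount(nums: List[int]) -> int:
--     # 一个递增数组长度为n，删任何一个子数组都还是递增的，删子数组的长度为n，有1种
--     # 删子数组长度为1，有n种方法，总共有（1+n)*n/2
--
--     # 后缀如果不是递增，0 1 2 3 1 1，递增到索引3，可以从索引4开始删，当然也可以从索引3、索引2开始删
--     # 可能性有i+2种
--
--     # 如果后缀也递增，并且后缀的第一个比前缀的最后一个大，那么挖掉中间一段也行。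
--     # 并且中间这段可以向两边扩大，剩下的数组仍然是递增的
--     # 0 1 2 3 （1 2） 4 5 6，挖的12 挖123  挖312 都可以
--     # 用固定后缀的方式来统计
--     n = len(nums)
--     # 统计前缀的最大长度
--     i = 0
--     while i+1<n and nums[i]<nums[i+1]:i+=1
--     if i==n-1:return n*(n+1)//2
--     j=n-1
--     ans=i+2
--     while j==n-1 or nums[j]<nums[j+1]:
--         while i>=0 and nums[i]>=nums[j]:
--             i-=1
--         ans+=i+2
--         j-=1
--     return ans
-- ===== SOURCE B (Python) =====
-- from typing import List
-- from bisect import bisect_left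
--
-- def incremovableSubarrayCount(nums: List[int]) -> int:
--     n = len(nums)
--     # last index of the strictly increasing prefix
--     p = 0
--     while p + 1 < n and nums[p] < nums[p + 1]:
--         p += 1
--     if p == n - 1:
--         return n * (n + 1) // 2
--     # first index of the maximal strictly increasing suffix
--     s = n - 1
--     while s > 0 and nums[s - 1] < nums[s]:
--         s -= 1
--     # for each suffix start j, the prefix cut points are counted by binary search
--     # over the sorted prefix nums[0:p+1]; the empty suffix contributes p+2.
--     return (p + 2) + sum(bisect_left(nums, nums[j], 0, p + 1) + 1 for j in range(s, n))
-- ===== Notes on version B (the rewrite author's own statement) =====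
-- stated objective: alternative
-- what changed: Replaces A's backward outer while-loop with a persistent two-pointer inner scan by first locating the maximal increasing suffix and then summing, over each suffix start, a binary search (bisect_left) into the sorted prefix.
import Mathlib
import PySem

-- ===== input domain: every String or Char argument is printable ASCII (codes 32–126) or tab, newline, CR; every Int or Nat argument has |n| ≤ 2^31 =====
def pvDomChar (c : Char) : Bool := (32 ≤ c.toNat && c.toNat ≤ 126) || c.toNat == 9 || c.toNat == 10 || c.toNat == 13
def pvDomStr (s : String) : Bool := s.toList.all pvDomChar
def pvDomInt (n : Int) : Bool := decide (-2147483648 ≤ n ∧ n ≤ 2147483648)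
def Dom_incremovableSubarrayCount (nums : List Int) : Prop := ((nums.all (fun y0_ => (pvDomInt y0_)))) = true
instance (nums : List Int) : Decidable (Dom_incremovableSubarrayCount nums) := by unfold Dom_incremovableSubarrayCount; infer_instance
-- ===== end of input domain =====

-- B differs from A: it precomputes the maximal increasing suffix and counts prefix cut
-- points per suffix start with a binary search into the sorted prefix, instead of A's
-- backward while-loop with a persistent two-pointer inner scan.  Neither mutates its input.

-- ===== PORT A =====
-- while i+1<n and nums[i]<nums[i+1]: i+=1   (indices are in range whenever the guard holds)
def pvPrefA (nums : List Int) (n : Nat) (i : Nat) : Nat :=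
  if h : i + 1 < n ∧ nums.getD i 0 < nums.getD (i+1) 0 then pvPrefA nums n (i+1) else i
termination_by n - i
decreasing_by omega

-- while i>=0 and nums[i]>=nums[j]: i-=1   (i.toNat is the Python index: i ≥ 0 inside the guard)
def pvInnerA (nums : List Int) (v : Int) (i : Int) : Int :=
  if h : 0 ≤ i ∧ v ≤ nums.getD i.toNat 0 then pvInnerA nums v (i-1) else i
termination_by (i+1).toNat
decreasing_by omega

-- while j==n-1 or nums[j]<nums[j+1]: …  — fuel-bounded transcription of A's backward loop;
-- on every input Python's loop accepts (nonempty nums) j stays in [0, n-1], so fuel n is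
-- never the reason the loop stops and j.toNat is exactly the Python index.
def pvOuterA (nums : List Int) (n : Int) : Nat → Int → Int → Int → Int
  | 0, _, _, ans => ans
  | fuel+1, j, i, ans =>
    if j = n - 1 ∨ nums.getD j.toNat 0 < nums.getD (j+1).toNat 0 then
      let i' := pvInnerA nums (nums.getD j.toNat 0) i
      pvOuterA nums n fuel (j-1) i' (ans + i' + 2)
    else ans

def incremovableSubarrayCount (nums : List Int) : Int :=
  let n : Int := nums.length
  let i : Int := pvPrefA nums nums.length 0
  if i = n - 1 then PySem.Int.floordiv (n * (n + 1)) 2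
  else pvOuterA nums n nums.length (n-1) i (i+2)

-- ===== PORT B =====
-- while p+1<n and nums[p]<nums[p+1]: p+=1
def pvPrefB (nums : List Int) (n : Nat) (p : Nat) : Nat :=
  if h : p + 1 < n ∧ nums.getD p 0 < nums.getD (p+1) 0 then pvPrefB nums n (p+1) else p
termination_by n - p
decreasing_by omega

-- while s>0 and nums[s-1]<nums[s]: s-=1
def pvSufB (nums : List Int) (s : Nat) : Nat :=
  if h : 0 < s ∧ nums.getD (s-1) 0 < nums.getD s 0 then pvSufB nums (s-1) else s
termination_by s
decreasing_by omega

-- bisect.bisect_left(nums, x, lo, hi): CPython's binary search, step for step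
def pvBisect (nums : List Int) (x : Int) (lo hi : Nat) : Nat :=
  if h : lo < hi then
    if nums.getD ((lo + hi) / 2) 0 < x then pvBisect nums x ((lo + hi) / 2 + 1) hi
    else pvBisect nums x lo ((lo + hi) / 2)
  else lo
termination_by hi - lo
decreasing_by all_goals omega

def incremovableSubarrayCount_alt (nums : List Int) : Int :=
  let n : Nat := nums.length
  let p : Nat := pvPrefB nums n 0
  if (p : Int) = (n : Int) - 1 then PySem.Int.floordiv ((n : Int) * ((n : Int) + 1)) 2
  else
    let s : Nat := pvSufB nums (n - 1)
    ((p : Int) + 2) +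
      ((List.range' s (n - s)).map
        (fun j => ((pvBisect nums (nums.getD j 0) 0 (p+1) : Nat) : Int) + 1)).sum

-- ===== PRECONDITION & SPEC =====
-- Pre_ excludes only the empty list, on which A raises IndexError (nums[-1] in the j loop).
def Pre_incremovableSubarrayCount (nums : List Int) : Prop := nums ≠ []
instance (nums : List Int) : Decidable (Pre_incremovableSubarrayCount nums) := by
  unfold Pre_incremovableSubarrayCount; infer_instance

def pvWitness_incremovableSubarrayCount : List Int := [1, 3, 2]

def Spec_incremovableSubarrayCount (nums : List Int) (out : Int) : Prop := out = incremovableSubarrayCount_alt nums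
instance (nums : List Int) (out : Int) : Decidable (Spec_incremovableSubarrayCount nums out) := by unfold Spec_incremovableSubarrayCount; infer_instance

-- ===== CLAIM (what is proved, stated in full; the proofs are below) =====
def Claim_equal_incremovableSubarrayCount : Prop := ∀ (nums : List Int), Dom_incremovableSubarrayCount nums → Pre_incremovableSubarrayCount nums → Spec_incremovableSubarrayCount nums (incremovableSubarrayCount nums)

-- ===== LEMMAS AND PROOFS =====

-- the two prefix scans are the same recursion
lemma prefB_eq_prefA (nums : List Int) (n i : Nat) : pvPrefB nums n i = pvPrefA nums n i := by
  fun_induction pvPrefB nums n i with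
  | case1 p h ih => rw [pvPrefA, dif_pos h]; exact ih
  | case2 p h => rw [pvPrefA, dif_neg h]

-- prefix-scan specification
lemma pref_spec (nums : List Int) (n i : Nat) :
    i ≤ pvPrefA nums n i ∧ (i < n → pvPrefA nums n i < n) ∧
    (∀ k, i ≤ k → k < pvPrefA nums n i → nums.getD k 0 < nums.getD (k+1) 0) ∧
    (pvPrefA nums n i + 1 < n → ¬ nums.getD (pvPrefA nums n i) 0 < nums.getD (pvPrefA nums n i + 1) 0) := by
  fun_induction pvPrefA nums n i with
  | case1 i h ih =>
    obtain ⟨ih1, ih2, ih3, ih4⟩ := ih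
    refine ⟨by omega, fun _ => ih2 (by omega), ?_, ih4⟩
    intro k hk1 hk2
    rcases Nat.lt_or_ge k (i+1) with hlt | hge
    · have : k = i := by omega
      subst this; exact h.2
    · exact ih3 k hge hk2
  | case2 i h =>
    refine ⟨le_refl _, fun hi => ?_, fun k hk1 hk2 => by omega, fun hn => ?_⟩
    · by_cases h1 : i + 1 < n <;> omega
    · intro hc; exact h ⟨hn, hc⟩

-- adjacent strict increase on [0,p] gives strict sortedness there
lemma chain_lt (nums : List Int) (p : Nat)
    (h : ∀ k, k < p → nums.getD k 0 < nums.getD (k+1) 0) :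
    ∀ a b : Nat, a < b → b ≤ p → nums.getD a 0 < nums.getD b 0 := by
  intro a b hab hbp
  induction b with
  | zero => omega
  | succ b ih =>
    rcases Nat.lt_or_ge a b with h1 | h1
    · exact lt_trans (ih h1 (by omega)) (h b (by omega))
    · have : a = b := by omega
      subst this; exact h a (by omega)

-- inner-scan specification
lemma inner_spec (nums : List Int) (v : Int) (i : Int) (h0 : -1 ≤ i) :
    -1 ≤ pvInnerA nums v i ∧ pvInnerA nums v i ≤ i ∧
    (0 ≤ pvInnerA nums v i → nums.getD (pvInnerA nums v i).toNat 0 < v) ∧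
    (∀ k : Nat, pvInnerA nums v i < (k : Int) → (k : Int) ≤ i → v ≤ nums.getD k 0) := by
  fun_induction pvInnerA nums v i with
  | case1 i h ih =>
    obtain ⟨ih1, ih2, ih3, ih4⟩ := ih (by omega)
    refine ⟨ih1, by omega, ih3, ?_⟩
    intro k hk1 hk2
    rcases Int.lt_or_le (k : Int) i with h1 | h1
    · exact ih4 k hk1 (by omega)
    · have : (k : Int) = i := by omega
      have : i.toNat = k := by omega
      rw [← this]; exact h.2
  | case2 i h =>
    refine ⟨h0, le_refl _, ?_, fun k hk1 hk2 => by omega⟩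
    intro hpos
    rcases not_and_or.mp h with h1 | h1
    · omega
    · omega

-- suffix-scan specification
lemma suf_spec (nums : List Int) (s0 : Nat) :
    pvSufB nums s0 ≤ s0 ∧
    (∀ k, pvSufB nums s0 ≤ k → k < s0 → nums.getD k 0 < nums.getD (k+1) 0) ∧
    (0 < pvSufB nums s0 → ¬ nums.getD (pvSufB nums s0 - 1) 0 < nums.getD (pvSufB nums s0) 0) := by
  fun_induction pvSufB nums s0 with
  | case1 s h ih =>
    obtain ⟨ih1, ih2, ih3⟩ := ih
    refine ⟨by omega, ?_, ih3⟩
    intro k hk1 hk2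
    rcases Nat.lt_or_ge k (s-1) with h1 | h1
    · exact ih2 k hk1 h1
    · have hks : k = s - 1 := by omega
      subst hks
      have : s - 1 + 1 = s := by omega
      rw [this]; exact h.2
  | case2 s h =>
    refine ⟨le_refl _, fun k hk1 hk2 => by omega, fun hpos => ?_⟩
    intro hc; exact h ⟨hpos, hc⟩

-- binary-search specification on a strictly sorted range
lemma bisect_spec (nums : List Int) (x : Int) (hi0 : Nat)
    (hs : ∀ a b : Nat, a < b → b < hi0 → nums.getD a 0 < nums.getD b 0) :
    ∀ lo hi : Nat, lo ≤ hi → hi ≤ hi0 →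
    (∀ k, k < lo → nums.getD k 0 < x) →
    (∀ k, hi ≤ k → k < hi0 → ¬ nums.getD k 0 < x) →
    (∀ k, k < pvBisect nums x lo hi → nums.getD k 0 < x) ∧
    (∀ k, pvBisect nums x lo hi ≤ k → k < hi0 → ¬ nums.getD k 0 < x) ∧
    pvBisect nums x lo hi ≤ hi0 := by
  intro lo hi
  fun_induction pvBisect nums x lo hi with
  | case1 lo hi hlt hmid ih =>
    intro _ hhi hlo2 hhi2
    apply ih (by omega) hhi
    · intro k hk
      rcases Nat.lt_or_ge k ((lo+hi)/2) with h1 | h1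
      · exact lt_of_lt_of_le (hs k _ h1 (by omega)) (le_of_lt hmid)
      · have : k = (lo+hi)/2 := by omega
        subst this; exact hmid
    · exact hhi2
  | case2 lo hi hlt hmid ih =>
    intro _ hhi hlo2 hhi2
    apply ih (by omega) (by omega) hlo2
    intro k hk1 hk2
    rcases Nat.lt_or_ge ((lo+hi)/2) k with h1 | h1
    · intro hc
      exact hmid (lt_trans (hs _ k h1 hk2) hc)
    · have : k = (lo+hi)/2 := by omega
      subst this; exact hmid
  | case3 lo hi hlt =>
    intro hle hhi hlo2 hhi2
    have : lo = hi := by omega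
    subst this
    exact ⟨hlo2, hhi2, by omega⟩

-- the binary-search insertion point equals A's stopped pointer plus one
lemma bisect_eq_inner (nums : List Int) (p : Nat) (v : Int)
    (hs : ∀ a b : Nat, a < b → b ≤ p → nums.getD a 0 < nums.getD b 0)
    (i' : Int) (h1 : -1 ≤ i') (h2 : i' ≤ (p : Int))
    (h3 : 0 ≤ i' → nums.getD i'.toNat 0 < v)
    (h4 : ∀ k : Nat, i' < (k : Int) → (k : Int) ≤ (p : Int) → v ≤ nums.getD k 0) :
    ((pvBisect nums v 0 (p+1) : Nat) : Int) = i' + 1 := by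
  have hs' : ∀ a b : Nat, a < b → b < p + 1 → nums.getD a 0 < nums.getD b 0 := by
    intro a b hab hb; exact hs a b hab (by omega)
  obtain ⟨b1, b2, b3⟩ := bisect_spec nums v (p+1) hs' 0 (p+1) (by omega) (le_refl _)
    (fun k hk => by omega) (fun k hk1 hk2 => by omega)
  set r := pvBisect nums v 0 (p+1) with hr
  by_contra hne
  rcases Int.lt_or_le ((r : Nat) : Int) (i' + 1) with hlt | hle
  · have hri : (r : Int) ≤ i' := by omega
    have hi0 : 0 ≤ i' := by omega
    have hrp : r < p + 1 := by omega
    have hless : nums.getD r 0 < v := by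
      rcases Nat.lt_or_ge r i'.toNat with hx | hx
      · exact lt_trans (hs r i'.toNat hx (by omega)) (h3 hi0)
      · have : r = i'.toNat := by omega
        rw [this]; exact h3 hi0
    exact b2 r (le_refl _) hrp hless
  · have hlt2 : ((i' + 1).toNat) < r := by omega
    have := b1 (i'+1).toNat hlt2
    have := h4 (i'+1).toNat (by omega) (by omega)
    omega

-- A's outer loop, started at j = s-1+t, adds exactly B's binary-search counts for
-- the suffix starts s, …, s-1+t
lemma outer_main (nums : List Int) (p s : Nat)
    (hp_sorted : ∀ a b : Nat, a < b → b ≤ p → nums.getD a 0 < nums.getD b 0)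
    (hsuf : ∀ k, s ≤ k → k < nums.length - 1 → nums.getD k 0 < nums.getD (k+1) 0)
    (hstop : ¬ nums.getD (s-1) 0 < nums.getD s 0)
    (hsp : p < s) (hs_le : s ≤ nums.length - 1) (hn : 1 ≤ nums.length) :
    ∀ (t fuel : Nat) (i ans : Int), t ≤ nums.length - s → t + 1 ≤ fuel →
    ((t = nums.length - s ∧ i = (p : Int)) ∨
     (t < nums.length - s ∧ -1 ≤ i ∧ i ≤ (p : Int) ∧
      ∀ k : Nat, i < (k : Int) → k ≤ p → nums.getD (s + t) 0 ≤ nums.getD k 0)) →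
    pvOuterA nums (nums.length : Int) fuel ((s : Int) - 1 + t) i ans
      = ans + ((List.range' s t).map
          (fun j => ((pvBisect nums (nums.getD j 0) 0 (p+1) : Nat) : Int) + 1)).sum := by
  intro t
  induction t with
  | zero =>
    intro fuel i ans ht hfuel H
    obtain ⟨f, rfl⟩ : ∃ f, fuel = f + 1 := ⟨fuel - 1, by omega⟩
    rw [pvOuterA]
    rw [if_neg]
    · simp
    · push Not
      constructor
      · have hsn : s < nums.length := by omega
        omega
      · have e1 : ((s : Int) - 1 + (0:Nat)).toNat = s - 1 := by omega
        have e2 : ((s : Int) - 1 + (0:Nat) + 1).toNat = s := by omega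
        rw [e1, e2]
        omega
  | succ t ih =>
    intro fuel i ans ht hfuel H
    obtain ⟨f, rfl⟩ : ∃ f, fuel = f + 1 := ⟨fuel - 1, by omega⟩
    have hi0 : -1 ≤ i := by rcases H with ⟨_, rfl⟩ | ⟨_, h, _⟩ <;> omega
    have hip : i ≤ (p : Int) := by rcases H with ⟨_, rfl⟩ | ⟨_, _, h, _⟩ <;> omega
    have ej : ((s : Int) - 1 + ((t:Nat)+1 : Nat)).toNat = s + t := by push_cast; omega
    have ej1 : ((s : Int) - 1 + ((t:Nat)+1 : Nat) + 1).toNat = s + t + 1 := by push_cast; omega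
    rw [pvOuterA]
    rw [if_pos]
    case hc =>
      rcases Nat.eq_or_lt_of_le ht with he | hlt
      · left
        have : s + t + 1 = nums.length := by omega
        push_cast; omega
      · right
        rw [ej, ej1]
        exact hsuf (s+t) (by omega) (by omega)
    · set v := nums.getD ((s : Int) - 1 + ((t:Nat)+1 : Nat)).toNat 0 with hv
      have hvv : v = nums.getD (s+t) 0 := by rw [hv, ej]
      obtain ⟨i1, i2, i3, i4⟩ := inner_spec nums v i hi0
      set i' := pvInnerA nums v i with hi'
      have hfull : ∀ k : Nat, i' < (k : Int) → (k : Int) ≤ (p : Int) → v ≤ nums.getD k 0 := by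
        intro k hk1 hk2
        rcases le_or_gt ((k : Int)) i with hki | hki
        · exact i4 k hk1 hki
        · rcases H with ⟨he, rfl⟩ | ⟨hlt, _, _, hinv⟩
          · omega
          · have hstep : nums.getD (s+t) 0 < nums.getD (s+t+1) 0 :=
              hsuf (s+t) (by omega) (by omega)
            have := hinv k hki (by omega)
            rw [hvv]
            refine le_of_lt (lt_of_lt_of_le hstep ?_)
            have e : s + (t+1) = s + t + 1 := by omega
            rw [e] at hinv
            exact hinv k hki (by exact_mod_cast hk2)
      have hbis : ((pvBisect nums v 0 (p+1) : Nat) : Int) = i' + 1 :=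
        bisect_eq_inner nums p v hp_sorted i' i1 (le_trans i2 hip) i3 hfull
      have hrec := ih f i' (ans + i' + 2) (by omega) (by omega)
        (Or.inr ⟨by omega, i1, le_trans i2 hip, by
          intro k hk1 hk2; rw [← hvv]; exact hfull k hk1 (by exact_mod_cast hk2)⟩)
      have ejm : (s : Int) - 1 + ((t:Nat)+1 : Nat) - 1 = (s : Int) - 1 + (t : Nat) := by
        push_cast; ring
      rw [ejm, hrec]
      rw [List.range'_concat]
      simp only [List.map_append, List.sum_append, List.map_cons, List.map_nil,
        List.sum_cons, List.sum_nil, one_mul]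
      rw [← hvv, hbis]
      ring

-- ===== VERDICT (by name: the statement is the Claim_ definition above) =====
theorem incremovableSubarrayCount_spec : Claim_equal_incremovableSubarrayCount := by
  intro nums hdom hpre
  unfold Spec_incremovableSubarrayCount incremovableSubarrayCount incremovableSubarrayCount_alt
  dsimp only []
  have hn : 1 ≤ nums.length := by
    cases nums with
    | nil => exact absurd rfl hpre
    | cons a l => simp
  rw [prefB_eq_prefA]
  set p := pvPrefA nums nums.length 0 with hpdef
  obtain ⟨q1, q2, q3, q4⟩ := pref_spec nums nums.length 0
  rw [← hpdef] at q2 q3 q4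
  have hpn : p < nums.length := q2 hn
  by_cases hcase : (p : Int) = (nums.length : Int) - 1
  · rw [if_pos hcase, if_pos hcase]
  · rw [if_neg hcase, if_neg hcase]
    have hpn2 : p + 1 < nums.length := by omega
    have hp_sorted := chain_lt nums p (fun k hk => q3 k (by omega) hk)
    set s := pvSufB nums (nums.length - 1) with hsdef
    obtain ⟨s1, s2, s3⟩ := suf_spec nums (nums.length - 1)
    rw [← hsdef] at s1 s2 s3
    have hsuf : ∀ k, s ≤ k → k < nums.length - 1 → nums.getD k 0 < nums.getD (k+1) 0 := s2
    have hsp : p < s := by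
      by_contra hc
      exact (q4 hpn2) (hsuf p (by omega) (by omega))
    have hstop : ¬ nums.getD (s-1) 0 < nums.getD s 0 := s3 (by omega)
    have hmain := outer_main nums p s hp_sorted hsuf hstop hsp s1 hn
      (nums.length - s) nums.length (p : Int) ((p : Int) + 2)
      (le_refl _) (by omega) (Or.inl ⟨rfl, rfl⟩)
    have ejj : (s : Int) - 1 + ((nums.length - s : Nat) : Int) = (nums.length : Int) - 1 := by
      have : s ≤ nums.length := by omega
      push_cast [Nat.cast_sub this]
      ring
    rw [ejj] at hmain
    rw [hmain]
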